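-- pv_equiv track=rewrite | github.com/SicongLiu/OLSH | Python_Analysis/Norm_Analysis_Bin_Partition_Script.py | gen_hash_tables
-- ===== SOURCE A (Python) =====
-- import math
--
-- def gen_hash_tables(top_k_):
--     hashTables = []
--     start_char = 'a'
--     temp_prefix = ''
--     for ii in range(top_k_):
--         temp_index = ii
--         start_char_length = float(temp_index) / 26
--         start_char_diff = temp_index % 26
--         temp_char = chr(ord(start_char) + start_char_diff)
--
--         if math.floor(start_char_length) > temp_prefix.__len__():
--             temp_prefix = temp_prefix + 'a'
--         temp_char = temp_prefix + temp_char
--         hashTables.append(temp_char)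
--
--     result_ = ', '.join(hashTables)
--     return result_
-- ===== SOURCE B (Python) =====
-- def gen_hash_tables(top_k_):
--     # Block-by-block enumeration: build the 'a'*block prefix once per 26-label block.
--     labels = []
--     count = 0
--     block = 0
--     while count < top_k_:
--         prefix = 'a' * block
--         for c in range(26):
--             if count >= top_k_:
--                 break
--             labels.append(prefix + chr(97 + c))
--             count += 1
--         block += 1
--     return ', '.join(labels)
-- ===== Notes on version B (the rewrite author's own statement) =====
-- stated objective: alternative
-- what changed: Replaces the per-index float-division/modulo pass that grows the prefix via a length comparison with a two-level block enumeration: the repeated-'a' prefix is built once per alphabet block, the inner loop emits one label per letter, and emission stops mid-block once top_k_ labels are out.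
import Mathlib
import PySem

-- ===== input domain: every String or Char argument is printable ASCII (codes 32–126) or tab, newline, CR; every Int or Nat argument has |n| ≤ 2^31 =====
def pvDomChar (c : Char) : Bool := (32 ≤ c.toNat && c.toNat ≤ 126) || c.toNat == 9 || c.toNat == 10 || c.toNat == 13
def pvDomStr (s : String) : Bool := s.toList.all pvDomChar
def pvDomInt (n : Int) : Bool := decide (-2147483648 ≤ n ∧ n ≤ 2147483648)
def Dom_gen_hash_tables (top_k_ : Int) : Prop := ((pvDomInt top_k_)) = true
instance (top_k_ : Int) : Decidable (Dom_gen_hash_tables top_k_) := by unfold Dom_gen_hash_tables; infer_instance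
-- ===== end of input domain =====

-- B enumerates labels block by block (prefix 'a'*block built once per 26-label block) instead of
-- A's per-index float-division/modulo pass; same cost, different decomposition ("alternative").

-- ===== PORT A =====
-- one loop step of A; strings carried as List Char (PySem.Chars route)
def genStepA (s : List (List Char) × List Char) (ii : Int) : List (List Char) × List Char :=
  -- math.floor(float(ii)/26) = ii // 26 exactly: |ii| ≤ 2^31 < 2^53, so the float quotient
  -- is within 2^-26 of the true value and never crosses an integer boundary
  let start_char_length := PySem.Int.floordiv ii 26
  let start_char_diff := PySem.Int.mod ii 26
  let temp_char0 : List Char := [Char.ofNat (97 + start_char_diff).toNat]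
  let temp_prefix := if start_char_length > (s.2.length : Int) then s.2 ++ ['a'] else s.2
  (s.1 ++ [temp_prefix ++ temp_char0], temp_prefix)

def gen_hash_tables (top_k_ : Int) : String :=
  String.ofList (PySem.Chars.join (", ".toList)
    ((PySem.List.pyRange 0 top_k_ 1).foldl genStepA ([], [])).1)

-- ===== PORT B =====
-- outer while-loop over blocks; inner loop = take of the 26-letter block
def altLabelsLoop (block : Nat) (remaining : Nat) : List (List Char) :=
  if _h : remaining = 0 then []
  else
    let pfx := List.replicate block 'a'
    let taken := ((List.range 26).map (fun c => pfx ++ [Char.ofNat (97 + c)])).take remaining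
    taken ++ altLabelsLoop (block + 1) (remaining - taken.length)
termination_by remaining
decreasing_by simp; omega

def gen_hash_tables_alt (top_k_ : Int) : String :=
  String.ofList (PySem.Chars.join (", ".toList) (altLabelsLoop 0 top_k_.toNat))

-- ===== PRECONDITION & SPEC =====
def Spec_gen_hash_tables (top_k_ : Int) (out : String) : Prop := out = gen_hash_tables_alt top_k_
instance (top_k_ : Int) (out : String) : Decidable (Spec_gen_hash_tables top_k_ out) := by unfold Spec_gen_hash_tables; infer_instance

-- ===== CLAIM (what is proved, stated in full; the proofs are below) =====
def Claim_equal_gen_hash_tables : Prop := ∀ (top_k_ : Int), Dom_gen_hash_tables top_k_ → Spec_gen_hash_tables top_k_ (gen_hash_tables top_k_)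

-- ===== LEMMAS AND PROOFS =====

-- the label for index i, in closed form
def pvLabel (b i : Nat) : List Char := List.replicate (b + i / 26) 'a' ++ [Char.ofNat (97 + i % 26)]

theorem altLoop_eq (r : Nat) : ∀ b, altLabelsLoop b r = (List.range r).map (pvLabel b) := by
  induction r using Nat.strong_induction_on with
  | _ r ih =>
    intro b
    rw [altLabelsLoop]
    by_cases h : r = 0
    · simp [h]
    · simp only [h, dif_neg, not_false_iff]
      rw [← List.map_take, List.take_range]
      by_cases h26 : r ≤ 26
      · have hmin : min r 26 = r := by omega
        rw [hmin]
        have hrec : r - (((List.range r).map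
            (fun c => List.replicate b 'a' ++ [Char.ofNat (97 + c)])).length) = 0 := by
          simp
        rw [hrec, altLabelsLoop]
        simp only [dif_pos, List.append_nil]
        apply List.map_congr_left
        intro i hi
        rw [List.mem_range] at hi
        unfold pvLabel
        rw [Nat.div_eq_of_lt (by omega), Nat.mod_eq_of_lt (by omega), Nat.add_zero]
      · have hmin : min r 26 = 26 := by omega
        rw [hmin]
        have hlen : (((List.range 26).map
            (fun c => List.replicate b 'a' ++ [Char.ofNat (97 + c)])).length) = 26 := by simp
        rw [hlen]
        rw [ih (r - 26) (by omega) (b + 1)]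
        have hsplit : List.range r = List.range 26 ++ (List.range (r - 26)).map (26 + ·) := by
          rw [← List.range_add]
          congr 1
          omega
        have hA : (List.range 26).map (fun c => List.replicate b 'a' ++ [Char.ofNat (97 + c)]) =
            (List.range 26).map (pvLabel b) := by
          apply List.map_congr_left
          intro i hi
          rw [List.mem_range] at hi
          unfold pvLabel
          rw [Nat.div_eq_of_lt (by omega), Nat.mod_eq_of_lt (by omega), Nat.add_zero]
        have hB : (List.range (r - 26)).map (pvLabel (b + 1)) =
            (List.range (r - 26)).map (pvLabel b ∘ (fun x => 26 + x)) := by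
          apply List.map_congr_left
          intro j _
          simp only [Function.comp]
          unfold pvLabel
          have h1 : b + 1 + j / 26 = b + (26 + j) / 26 := by omega
          have h2 : 97 + j % 26 = 97 + (26 + j) % 26 := by omega
          rw [h1, h2]
        rw [hA, hB, hsplit, List.map_append, List.map_map]

-- A's fold invariant: after the first n indices the labels are pvLabel 0 for 0..n-1
-- and the prefix is 'a' * ((n-1)/26) (i.e. length 0 for n = 0).
theorem foldA_eq (n : Nat) :
    ((List.range n).map (fun k : Nat => (0 : Int) + (k : Int))).foldl genStepA ([], []) =
      ((List.range n).map (pvLabel 0), List.replicate ((n - 1) / 26) 'a') := by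
  induction n with
  | zero => simp
  | succ m ih =>
    rw [List.range_succ]
    simp only [List.map_append, List.foldl_append, ih]
    simp only [List.map_cons, List.map_nil, List.foldl_cons, List.foldl_nil]
    unfold genStepA
    simp only [PySem.Int.floordiv, PySem.Int.mod, zero_add]
    have hfd : Int.fdiv (m : Int) 26 = ((m / 26 : Nat) : Int) := by
      rw [Int.fdiv_eq_ediv]
      omega
    have hmd : Int.fmod (m : Int) 26 = ((m % 26 : Nat) : Int) := by
      rw [Int.fmod_eq_emod]
      omega
    rw [hfd, hmd]
    have hpl : ∀ p : Nat, (if ((m / 26 : Nat) : Int) > ((List.replicate p 'a').length : Int)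
        then List.replicate p 'a' ++ ['a'] else List.replicate p 'a') = List.replicate p 'a' ++
          List.replicate (if m / 26 > p then 1 else 0) 'a' := by
      intro p
      by_cases hc : m / 26 > p
      · have : ((m / 26 : Nat) : Int) > ((List.replicate p 'a').length : Int) := by
          simp; exact_mod_cast hc
        rw [if_pos this, if_pos hc]
        simp
      · have : ¬ ((m / 26 : Nat) : Int) > ((List.replicate p 'a').length : Int) := by
          simp; omega
        rw [if_neg this, if_neg hc]
        simp
    rw [hpl]
    have hpre : List.replicate ((m - 1) / 26) 'a' ++
        List.replicate (if m / 26 > (m - 1) / 26 then 1 else 0) 'a' =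
          List.replicate (m / 26) 'a' := by
      rw [← List.replicate_add]
      congr 1
      by_cases hc : m / 26 > (m - 1) / 26
      · rw [if_pos hc]; omega
      · rw [if_neg hc]; omega
    rw [hpre]
    have hlab : List.replicate (m / 26) 'a' ++
        [Char.ofNat (97 + ((m % 26 : Nat) : Int)).toNat] = pvLabel 0 m := by
      unfold pvLabel
      have h2 : (97 + ((m % 26 : Nat) : Int)).toNat = 97 + m % 26 := by omega
      rw [h2]
      congr 2
      omega
    rw [hlab]
    have hn : (m + 1 - 1) / 26 = m / 26 := by omega
    rw [hn]

-- ===== VERDICT (by name: the statement is the Claim_ definition above) =====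
theorem gen_hash_tables_spec : Claim_equal_gen_hash_tables := by
  intro top_k_ _
  unfold Spec_gen_hash_tables gen_hash_tables gen_hash_tables_alt
  rw [PySem.List.pyRange_one]
  have h : (top_k_ - 0).toNat = top_k_.toNat := by omega
  rw [h, foldA_eq, altLoop_eq]
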